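-- pv_equiv track=rewrite | github.com/nna99d/do_an | subscriber.py | dnaInverse
-- ===== SOURCE A (Python) =====
-- def toDNA(v):
--     return "ACGT"[v & 3]
--
-- def fromDNA(c):
--     return {"A":0,"C":1,"G":2,"T":3}[c]
--
-- def dnaInverse(b, k):
--     mode = k & 3
--     dna = [toDNA((b >> (2*i)) & 3) for i in range(4)]
--     if mode == 1: # complement
--         dna = [{"A":"T","T":"A","C":"G","G":"C"}[c] for c in dna]
--     elif mode == 2: # reverse
--         dna = dna[::-1]
--     elif mode == 3: # swap pairs
--         dna = [dna[1],dna[0],dna[3],dna[2]]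
--     out=0
--     for i in range(4):
--         out |= (fromDNA(dna[i]) << (2*i))
--     return out
-- ===== SOURCE B (Python) =====
-- def dnaInverse(b, k):
--     m = b & 0xFF
--     mode = k & 3
--     if mode == 0:
--         return m
--     if mode == 1:
--         return m ^ 0xFF
--     if mode == 2:
--         return ((m & 3) << 6) | (((m >> 2) & 3) << 4) | (((m >> 4) & 3) << 2) | (m >> 6)
--     return ((m & 0x33) << 2) | ((m >> 2) & 0x33)
-- ===== Notes on version B (the rewrite author's own statement) =====
-- stated objective: simpler
-- what changed: B replaces the DNA-letter encoding (build a 4-letter list via string indexing, permute it via dict lookups / slicing / reindexing, decode with a dict fold) by direct shift/mask arithmetic on the byte b & 0xFF: identity, XOR 0xFF for complement, and fixed shift/mask reassembly for reverse and pair-swap.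
import Mathlib
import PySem

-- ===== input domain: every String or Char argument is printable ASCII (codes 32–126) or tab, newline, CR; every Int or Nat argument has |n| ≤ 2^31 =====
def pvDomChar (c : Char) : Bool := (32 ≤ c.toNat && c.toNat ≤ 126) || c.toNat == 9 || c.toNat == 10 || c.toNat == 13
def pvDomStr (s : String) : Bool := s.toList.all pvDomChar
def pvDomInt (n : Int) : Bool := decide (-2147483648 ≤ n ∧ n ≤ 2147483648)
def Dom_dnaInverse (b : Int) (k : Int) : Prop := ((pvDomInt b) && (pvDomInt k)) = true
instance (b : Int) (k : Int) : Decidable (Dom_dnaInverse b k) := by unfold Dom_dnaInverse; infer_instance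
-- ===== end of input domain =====

-- B replaces A's DNA-letter list/dict manipulation with direct shift/mask arithmetic on b & 0xFF (simpler, no intermediate structures).


-- ===== PORT A =====
-- "ACGT"[v & 3]: the index is always in 0..3, so the IndexError (none) default is unreachable
def toDNA (v : Int) : String :=
  (((PySem.Str.pyGet? "ACGT" (PySem.Int.band v 3)).getD 'A')).toString

-- {"A":0,"C":1,"G":2,"T":3}[c]: every key passed is present, so the KeyError default is unreachable
def fromDNA (c : String) : Int :=
  ((PySem.Dict.ofList [("A", (0:Int)), ("C", 1), ("G", 2), ("T", 3)]).get? c).getD 0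

def dnaInverse (b : Int) (k : Int) : Int :=
  let mode := PySem.Int.band k 3
  let dna := (PySem.List.pyRange 0 4 1).map (fun i => toDNA (PySem.Int.band (b >>> (2 * i).toNat) 3))
  let dna :=
    if mode == 1 then
      dna.map (fun c =>
        ((PySem.Dict.ofList [("A", "T"), ("T", "A"), ("C", "G"), ("G", "C")]).get? c).getD "")
    else if mode == 2 then
      (PySem.List.slice? dna none none (-1)).getD []
    else if mode == 3 then
      [(PySem.List.pyGet? dna 1).getD "", (PySem.List.pyGet? dna 0).getD "",
       (PySem.List.pyGet? dna 3).getD "", (PySem.List.pyGet? dna 2).getD ""]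
    else dna
  (PySem.List.pyRange 0 4 1).foldl
    (fun out i => PySem.Int.bor out (fromDNA ((PySem.List.pyGet? dna i).getD "") <<< (2 * i).toNat)) 0

-- ===== PORT B =====
def dnaInverse_alt (b : Int) (k : Int) : Int :=
  let m := PySem.Int.band b 255
  let mode := PySem.Int.band k 3
  if mode == 0 then m
  else if mode == 1 then PySem.Int.bxor m 255
  else if mode == 2 then
    PySem.Int.bor (PySem.Int.bor (PySem.Int.band m 3 <<< 6) (PySem.Int.band (m >>> 2) 3 <<< 4))
      (PySem.Int.bor (PySem.Int.band (m >>> 4) 3 <<< 2) (m >>> 6))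
  else PySem.Int.bor (PySem.Int.band m 51 <<< 2) (PySem.Int.band (m >>> 2) 51)

-- ===== PRECONDITION & SPEC =====
def Spec_dnaInverse (b : Int) (k : Int) (out : Int) : Prop := out = dnaInverse_alt b k
instance (b : Int) (k : Int) (out : Int) : Decidable (Spec_dnaInverse b k out) := by unfold Spec_dnaInverse; infer_instance

-- ===== CLAIM (what is proved, stated in full; the proofs are below) =====
def Claim_equal_dnaInverse : Prop := ∀ (b : Int) (k : Int), Dom_dnaInverse b k → Spec_dnaInverse b k (dnaInverse b k)

-- ===== LEMMAS AND PROOFS =====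

lemma band_three (x : Int) : PySem.Int.band x 3 = x % 4 := by
  have key : ∀ m : Nat, m &&& 3 = m % 4 := fun m => Nat.and_two_pow_sub_one_eq_mod m 2
  by_cases h : 0 ≤ x
  · simp only [PySem.Int.band, if_pos h, if_pos (show (0:Int) ≤ 3 by norm_num)]
    rw [show ((3:Int).toNat) = 3 from rfl, key]; omega
  · simp only [PySem.Int.band, if_neg h, if_pos (show (0:Int) ≤ 3 by norm_num)]
    rw [show ((3:Int).toNat) = 3 from rfl, Nat.and_comm, key]; omega

lemma band_mask255 (x : Int) : PySem.Int.band x 255 = x % 256 := by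
  have key : ∀ m : Nat, m &&& 255 = m % 256 := fun m => Nat.and_two_pow_sub_one_eq_mod m 8
  by_cases h : 0 ≤ x
  · simp only [PySem.Int.band, if_pos h, if_pos (show (0:Int) ≤ 255 by norm_num)]
    rw [show ((255:Int).toNat) = 255 from rfl, key]; omega
  · simp only [PySem.Int.band, if_neg h, if_pos (show (0:Int) ≤ 255 by norm_num)]
    rw [show ((255:Int).toNat) = 255 from rfl, Nat.and_comm, key]; omega

lemma A_reduce (b k : Int) : dnaInverse b k = dnaInverse (b % 256) (k % 4) := by
  have hk : PySem.Int.band k 3 = PySem.Int.band (k % 4) 3 := by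
    rw [band_three, band_three]; omega
  have e0 : PySem.Int.band (b >>> ((((2 * (0:Int)).toNat : Nat)) : Int)) 3
      = PySem.Int.band ((b % 256) >>> ((((2 * (0:Int)).toNat : Nat)) : Int)) 3 := by
    have t : (2 * (0:Int)).toNat = 0 := by decide
    rw [t, Int.shiftRight_natCast_right, Int.shiftRight_natCast_right,
        Int.shiftRight_eq_div_pow, Int.shiftRight_eq_div_pow,
        show (((2^(0:Nat) : Nat)) : Int) = 1 from by norm_num,
        band_three, band_three]
    omega
  have e1 : PySem.Int.band (b >>> ((((2 * (1:Int)).toNat : Nat)) : Int)) 3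
      = PySem.Int.band ((b % 256) >>> ((((2 * (1:Int)).toNat : Nat)) : Int)) 3 := by
    have t : (2 * (1:Int)).toNat = 2 := by decide
    rw [t, Int.shiftRight_natCast_right, Int.shiftRight_natCast_right,
        Int.shiftRight_eq_div_pow, Int.shiftRight_eq_div_pow,
        show (((2^(2:Nat) : Nat)) : Int) = 4 from by norm_num,
        band_three, band_three]
    omega
  have e2 : PySem.Int.band (b >>> ((((2 * (2:Int)).toNat : Nat)) : Int)) 3
      = PySem.Int.band ((b % 256) >>> ((((2 * (2:Int)).toNat : Nat)) : Int)) 3 := by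
    have t : (2 * (2:Int)).toNat = 4 := by decide
    rw [t, Int.shiftRight_natCast_right, Int.shiftRight_natCast_right,
        Int.shiftRight_eq_div_pow, Int.shiftRight_eq_div_pow,
        show (((2^(4:Nat) : Nat)) : Int) = 16 from by norm_num,
        band_three, band_three]
    omega
  have e3 : PySem.Int.band (b >>> ((((2 * (3:Int)).toNat : Nat)) : Int)) 3
      = PySem.Int.band ((b % 256) >>> ((((2 * (3:Int)).toNat : Nat)) : Int)) 3 := by
    have t : (2 * (3:Int)).toNat = 6 := by decide
    rw [t, Int.shiftRight_natCast_right, Int.shiftRight_natCast_right,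
        Int.shiftRight_eq_div_pow, Int.shiftRight_eq_div_pow,
        show (((2^(6:Nat) : Nat)) : Int) = 64 from by norm_num,
        band_three, band_three]
    omega
  simp only [dnaInverse, hk, e0, e1, e2, e3,
    show PySem.List.pyRange 0 4 1 = [0, 1, 2, 3] from by decide, List.map, List.foldl]

lemma B_reduce (b k : Int) : dnaInverse_alt b k = dnaInverse_alt (b % 256) (k % 4) := by
  have hb : PySem.Int.band (b % 256) 255 = PySem.Int.band b 255 := by
    rw [band_mask255, band_mask255]; omega
  have hk : PySem.Int.band (k % 4) 3 = PySem.Int.band k 3 := by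
    rw [band_three, band_three]; omega
  simp only [dnaInverse_alt, hb, hk]

set_option maxRecDepth 100000 in
set_option maxHeartbeats 2000000 in
lemma finite_check : ∀ r : Nat, r < 256 → ∀ mo : Nat, mo < 4 →
    dnaInverse (r : Int) (mo : Int) = dnaInverse_alt (r : Int) (mo : Int) := by decide

-- ===== VERDICT (by name: the statement is the Claim_ definition above) =====
theorem dnaInverse_spec : Claim_equal_dnaInverse := by
  intro b k _
  unfold Spec_dnaInverse
  rw [A_reduce, B_reduce]
  have hb : b % 256 = (((b % 256).toNat : Nat) : Int) := by omega
  have hk : k % 4 = (((k % 4).toNat : Nat) : Int) := by omega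
  rw [hb, hk]
  exact finite_check _ (by omega) _ (by omega)
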